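-- pv_equiv track=rewrite | github.com/Chi-Shan0707/NAD_Next | scripts/train_extreme8_selectors.py | _bucketize_specs
-- ===== SOURCE A (Python) =====
-- from typing import Any
--
-- def _bucketize_specs(specs: list[dict[str, Any]], workers: int) -> list[list[dict[str, Any]]]:
--     if not specs:
--         return []
--     n_workers = max(1, min(int(workers), len(specs)))
--     buckets: list[list[dict[str, Any]]] = [[] for _ in range(n_workers)]
--     for spec in specs:
--         idx = min(range(n_workers), key=lambda pos: len(buckets[pos]))
--         buckets[idx].append(spec)
--     return buckets
-- ===== SOURCE B (Python) =====
-- from typing import Any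
--
-- def _bucketize_specs(specs: list[dict[str, Any]], workers: int) -> list[list[dict[str, Any]]]:
--     if not specs:
--         return []
--     n_workers = max(1, min(int(workers), len(specs)))
--     chunks: list[list[dict[str, Any]]] = []
--     rest = specs
--     while rest:
--         chunks.append(rest[:n_workers])
--         rest = rest[n_workers:]
--     return [[chunk[i] for chunk in chunks if i < len(chunk)] for i in range(n_workers)]
-- ===== Notes on version B (the rewrite author's own statement) =====
-- stated objective: alternative
-- what changed: A assigns specs one by one, rescanning all buckets for the first shortest one each time; B instead chops specs into consecutive chunks of size n_workers with a while loop and then transposes the chunks, so bucket i is the i-th column of the chunk matrix and the per-spec bucket scan disappears.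
import Mathlib
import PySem

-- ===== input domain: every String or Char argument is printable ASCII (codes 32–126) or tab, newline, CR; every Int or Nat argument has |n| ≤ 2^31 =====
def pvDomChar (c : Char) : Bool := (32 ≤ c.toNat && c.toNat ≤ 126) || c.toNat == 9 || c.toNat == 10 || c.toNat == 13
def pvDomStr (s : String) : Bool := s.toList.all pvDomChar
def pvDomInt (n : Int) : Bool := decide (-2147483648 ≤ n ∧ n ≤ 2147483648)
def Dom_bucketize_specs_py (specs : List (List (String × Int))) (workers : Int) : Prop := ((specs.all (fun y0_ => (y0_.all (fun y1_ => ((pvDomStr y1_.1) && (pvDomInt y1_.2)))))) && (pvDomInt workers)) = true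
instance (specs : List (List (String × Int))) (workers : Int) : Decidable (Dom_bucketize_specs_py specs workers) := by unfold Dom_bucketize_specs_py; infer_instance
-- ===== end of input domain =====

-- B replaces A's per-spec argmin scan over buckets (first-tie-wins, i.e. round-robin) by a staged
-- chunk-then-transpose construction: chop specs into consecutive chunks of size n_workers, bucket i
-- is the i-th column of the chunks; same result, no per-spec bucket scan.

-- ===== PORT A =====
-- literal port of _bucketize_specs: min(range(n_workers), key=...) is min? over pyRange (range is
-- nonempty since n_workers ≥ 1, so min? is some; .getD 0 is unreachable), buckets[idx].append →
-- pyGetD / pySetD.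
def bucketize_specs_py (specs : List (List (String × Int))) (workers : Int) : List (List (List (String × Int))) :=
  if specs = [] then []
  else
    let n : Int := max 1 (min workers (specs.length : Int))
    specs.foldl
      (fun buckets spec =>
        let idx : Int :=
          (PySem.List.min? (PySem.List.pyRange 0 n 1)
            (fun pos => (PySem.List.pyGetD buckets pos ([] : List (List (String × Int)))).length)).getD 0
        PySem.List.pySetD buckets idx
          (PySem.List.pyGetD buckets idx ([] : List (List (String × Int))) ++ [spec]))
      ((PySem.List.pyRange 0 n 1).map (fun _ => ([] : List (List (String × Int)))))

-- ===== PORT B =====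
-- port of Source B's while loop: chunks.append(rest[:n]); rest = rest[n:]  (slices → PySem.List.slice);
-- the 'm < 1' branch is only a totality guard — every call site passes n ≥ 1.
def pvChunksB (xs : List (List (String × Int))) (m : Int) : List (List (List (String × Int))) :=
  if hx : xs = [] then []
  else if _hm : m < 1 then []
  else
    PySem.List.slice xs none (some m) ::
      pvChunksB (PySem.List.slice xs (some m) none) m
termination_by xs.length
decreasing_by
  rw [PySem.List.slice_from _ (by omega)]
  have hx' : xs.length ≠ 0 := fun h => hx (List.eq_nil_of_length_eq_zero h)
  have : 1 ≤ m.toNat := by omega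
  simp only [List.length_drop]
  omega

-- port of Source B: the comprehension [chunk[i] for chunk in chunks if i < len(chunk)] is a filterMap
-- with pyGet? (here i ≥ 0, so 'i < len(chunk)' is exactly 'pyGet? chunk i = some _').
def bucketize_specs_py_alt (specs : List (List (String × Int))) (workers : Int) : List (List (List (String × Int))) :=
  if specs = [] then []
  else
    let n : Int := max 1 (min workers (specs.length : Int))
    let chunks := pvChunksB specs n
    (PySem.List.pyRange 0 n 1).map
      (fun i => chunks.filterMap (fun c => PySem.List.pyGet? c i))

-- ===== PRECONDITION & SPEC =====
def Spec_bucketize_specs_py (specs : List (List (String × Int))) (workers : Int) (out : List (List (List (String × Int)))) : Prop := out = bucketize_specs_py_alt specs workers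
instance (specs : List (List (String × Int))) (workers : Int) (out : List (List (List (String × Int)))) : Decidable (Spec_bucketize_specs_py specs workers out) := by unfold Spec_bucketize_specs_py; infer_instance

-- ===== CLAIM (what is proved, stated in full; the proofs are below) =====
def Claim_equal_bucketize_specs_py : Prop := ∀ (specs : List (List (String × Int))) (workers : Int), Dom_bucketize_specs_py specs workers → Spec_bucketize_specs_py specs workers (bucketize_specs_py specs workers)

-- ===== LEMMAS AND PROOFS =====

-- the elements of xs whose (global) index is ≡ i (mod m), indices starting at k
def pvBfil {α : Type} (xs : List α) (k m i : Nat) : List α :=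
  match xs with
  | [] => []
  | x :: t => (if k % m = i then [x] else []) ++ pvBfil t (k + 1) m i

theorem pvBfil_append {α : Type} (p : List α) (s : α) (k m i : Nat) :
    pvBfil (p ++ [s]) k m i = pvBfil p k m i ++ (if (k + p.length) % m = i then [s] else []) := by
  induction p generalizing k with
  | nil => simp [pvBfil]
  | cons x t ih =>
      simp only [List.cons_append, pvBfil, ih (k + 1), List.length_cons, List.append_assoc]
      ring_nf

theorem pvBfil_len {α : Type} (p : List α) (m i : Nat) (hm : 0 < m) (hi : i < m) :
    (pvBfil p 0 m i).length = p.length / m + (if i < p.length % m then 1 else 0) := by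
  induction p using List.reverseRecOn with
  | nil => simp [pvBfil, Nat.zero_div, Nat.zero_mod]
  | append_singleton p s ih =>
      rw [pvBfil_append]
      have hr : p.length % m < m := Nat.mod_lt _ hm
      have hrep : p.length % m + m * (p.length / m) = p.length := Nat.mod_add_div _ _
      by_cases hc : p.length % m + 1 < m
      · have h1 : (p.length + 1) / m = p.length / m ∧ (p.length + 1) % m = p.length % m + 1 :=
          (Nat.div_mod_unique hm).mpr ⟨by omega, hc⟩
        simp only [List.length_append, Nat.zero_add, ih, h1.1, h1.2, apply_ite List.length,
          List.length_singleton, List.length_nil]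
        split_ifs <;> omega
      · have hmul : m * (p.length / m + 1) = m * (p.length / m) + m := by ring
        have h1 : (p.length + 1) / m = p.length / m + 1 ∧ (p.length + 1) % m = 0 :=
          (Nat.div_mod_unique hm).mpr ⟨by omega, hm⟩
        simp only [List.length_append, Nat.zero_add, ih, h1.1, h1.2, apply_ite List.length,
          List.length_singleton, List.length_nil]
        split_ifs <;> omega

-- min? keeps the FIRST minimal element: tail of the fold never replaces a strictly smaller acc
theorem pv_fold_stay {α : Type} (key : α → Nat) (zs : List α) (c : α)
    (h : ∀ z ∈ zs, ¬ key z < key c) :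
    List.foldl (fun acc x => match acc with
      | none => some x
      | some m => if key x < key m then some x else some m) (some c) zs = some c := by
  induction zs with
  | nil => rfl
  | cons z t ih =>
      have hz : ¬ key z < key c := h z (by simp)
      simp only [List.foldl_cons, if_neg hz]
      exact ih (fun z hz => h z (by simp [hz]))

theorem pv_fold_pick {α : Type} (key : α → Nat) (ys zs : List α) (x : α)
    (h2 : ∀ z ∈ zs, ¬ key z < key x) :
    ∀ (c : α), key x < key c → (∀ y ∈ ys, key x < key y) →
    List.foldl (fun acc v => match acc with
      | none => some v
      | some m => if key v < key m then some v else some m) (some c) (ys ++ x :: zs) = some x := by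
  induction ys with
  | nil =>
      intro c hc _
      simp only [List.nil_append, List.foldl_cons, if_pos hc]
      exact pv_fold_stay key zs x h2
  | cons y t ih =>
      intro c hc h1
      simp only [List.cons_append, List.foldl_cons]
      by_cases hy : key y < key c
      · simp only [if_pos hy]
        exact ih y (h1 y (by simp)) (fun z hz => h1 z (by simp [hz]))
      · simp only [if_neg hy]
        exact ih c hc (fun z hz => h1 z (by simp [hz]))

theorem pv_min?_first {α : Type} (key : α → Nat) (ys zs : List α) (x : α)
    (h1 : ∀ y ∈ ys, key x < key y) (h2 : ∀ z ∈ zs, ¬ key z < key x) :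
    PySem.List.min? (ys ++ x :: zs) key = some x := by
  cases ys with
  | nil =>
      simp only [List.nil_append, PySem.List.min?, List.foldl_cons]
      exact pv_fold_stay key zs x h2
  | cons y t =>
      simp only [PySem.List.min?, List.cons_append, List.foldl_cons]
      exact pv_fold_pick key t zs x h2 y (h1 y (by simp)) (fun z hz => h1 z (by simp [hz]))

-- value of buckets[pos] when the state is the round-robin table
theorem pv_getD_table {α : Type} (f : Nat → List α) (m : Nat) (pos : Int)
    (h0 : 0 ≤ pos) (hlt : pos < (m : Int)) :
    PySem.List.pyGetD ((List.range m).map f) pos ([] : List α) = f pos.toNat := by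
  rw [PySem.List.pyGetD_eq_getElem _ _ h0 (by simpa using hlt)]
  have hp : pos.toNat < m := by omega
  simp

-- A's argmin over range(n) of bucket lengths is p.length % m (first shortest bucket)
theorem pv_idx (p : List (List (String × Int))) (m : Nat) (hm : 0 < m) :
    PySem.List.min? (PySem.List.pyRange 0 (m : Int) 1)
      (fun pos => (PySem.List.pyGetD ((List.range m).map (fun i => pvBfil p 0 m i)) pos
        ([] : List (List (String × Int)))).length)
      = some ((p.length % m : Nat) : Int) := by
  set r := p.length % m with hrdef
  have hr : r < m := Nat.mod_lt _ hm
  have hcons : PySem.List.pyRange (r : Int) (m : Int) 1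
      = (r : Int) :: PySem.List.pyRange ((r : Int) + 1) (m : Int) 1 :=
    PySem.List.pyRange_one_cons (by exact_mod_cast hr)
  have hsplit : PySem.List.pyRange 0 (m : Int) 1
      = PySem.List.pyRange 0 (r : Int) 1 ++ ((r : Int) :: PySem.List.pyRange ((r : Int) + 1) (m : Int) 1) := by
    rw [PySem.List.pyRange_one_append 0 (r : Int) (m : Int) (by positivity) (by exact_mod_cast hr.le), hcons]
  rw [hsplit]
  have key_val : ∀ pos : Int, 0 ≤ pos → pos < (m : Int) →
      (PySem.List.pyGetD ((List.range m).map (fun i => pvBfil p 0 m i)) pos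
        ([] : List (List (String × Int)))).length
      = p.length / m + (if pos.toNat < r then 1 else 0) := by
    intro pos h0 hlt
    rw [pv_getD_table _ m pos h0 hlt]
    exact pvBfil_len p m pos.toNat hm (by omega)
  apply pv_min?_first
  · intro y hy
    rw [PySem.List.mem_pyRange_one] at hy
    rw [key_val y hy.1 (by omega), key_val (r : Int) (by positivity) (by exact_mod_cast hr)]
    have h1 : y.toNat < r := by omega
    simp [h1]
  · intro z hz
    rw [PySem.List.mem_pyRange_one] at hz
    rw [key_val z (by omega) hz.2, key_val (r : Int) (by positivity) (by exact_mod_cast hr)]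
    have h1 : ¬ z.toNat < r := by omega
    simp [h1]

-- one append step on the round-robin table
theorem pv_step (p : List (List (String × Int))) (s : List (String × Int)) (m : Nat) (hm : 0 < m) :
    PySem.List.pySetD ((List.range m).map (fun i => pvBfil p 0 m i)) ((p.length % m : Nat) : Int)
      (PySem.List.pyGetD ((List.range m).map (fun i => pvBfil p 0 m i)) ((p.length % m : Nat) : Int)
        ([] : List (List (String × Int))) ++ [s])
      = (List.range m).map (fun i => pvBfil (p ++ [s]) 0 m i) := by
  set r := p.length % m with hrdef
  have hr : r < m := Nat.mod_lt _ hm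
  rw [pv_getD_table _ m _ (by positivity) (by exact_mod_cast hr), PySem.List.pySetD_natCast]
  apply List.ext_getElem
  · simp
  · intro j hj hj'
    have hjm : j < m := by simpa using hj'
    rw [List.getElem_set]
    simp only [List.getElem_map, List.getElem_range]
    rw [pvBfil_append p s 0 m j]
    simp only [Nat.zero_add]
    by_cases hcase : r = j
    · have hpj : p.length % m = j := by omega
      simp [hcase, hpj]
    · have hpj : ¬ p.length % m = j := by omega
      simp [hcase, hpj]

-- A's whole fold computes the round-robin table
theorem pv_foldA (rest p : List (List (String × Int))) (m : Nat) (hm : 0 < m) :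
    rest.foldl
      (fun buckets spec =>
        let idx : Int :=
          (PySem.List.min? (PySem.List.pyRange 0 (m : Int) 1)
            (fun pos => (PySem.List.pyGetD buckets pos ([] : List (List (String × Int)))).length)).getD 0
        PySem.List.pySetD buckets idx
          (PySem.List.pyGetD buckets idx ([] : List (List (String × Int))) ++ [spec]))
      ((List.range m).map (fun i => pvBfil p 0 m i))
      = (List.range m).map (fun i => pvBfil (p ++ rest) 0 m i) := by
  induction rest generalizing p with
  | nil => simp
  | cons s t ih =>
      simp only [List.foldl_cons]
      rw [pv_idx p m hm]
      simp only [Option.getD_some]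
      rw [pv_step p s m hm, ih (p ++ [s])]
      simp

-- the common initial state is the empty round-robin table
theorem pv_init (m : Nat) :
    (PySem.List.pyRange 0 (m : Int) 1).map (fun _ => ([] : List (List (String × Int))))
      = (List.range m).map (fun i => pvBfil ([] : List (List (String × Int))) 0 m i) := by
  simp [PySem.List.pyRange_one, List.map_map, pvBfil, Function.comp_def, List.map_const']

-- ========== B-side lemmas: chunks-then-transpose is the same table ==========

theorem pvBfil_app {α : Type} (a b : List α) (k m i : Nat) :
    pvBfil (a ++ b) k m i = pvBfil a k m i ++ pvBfil b (k + a.length) m i := by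
  induction a generalizing k with
  | nil => simp [pvBfil]
  | cons x t ih =>
      simp only [List.cons_append, pvBfil, ih (k + 1), List.length_cons, List.append_assoc]
      ring_nf

theorem pvBfil_shift {α : Type} (b : List α) (k m i : Nat) :
    pvBfil b (k + m) m i = pvBfil b k m i := by
  induction b generalizing k with
  | nil => rfl
  | cons x t ih =>
      simp only [pvBfil, Nat.add_mod_right]
      have : k + m + 1 = (k + 1) + m := by ring
      rw [this, ih (k + 1)]

theorem pvBfil_small {α : Type} (a : List α) (m i : Nat) (ha : a.length ≤ m) :
    pvBfil a 0 m i = a[i]?.toList := by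
  induction a using List.reverseRecOn with
  | nil => simp [pvBfil]
  | append_singleton p s ih =>
      rw [pvBfil_append, ih (by simpa using Nat.le_of_succ_le (by simpa using ha))]
      have hp : p.length < m := by simpa using ha
      have hmod : p.length % m = p.length := Nat.mod_eq_of_lt hp
      by_cases hc : i = p.length
      · simp [hmod, hc]
      · by_cases hlt : i < p.length
        · simp [hmod, Ne.symm hc, List.getElem?_append_left hlt]
        · have h1 : p.length ≤ i := by omega
          have h2 : p[i]? = none := List.getElem?_eq_none (by omega)
          have h3 : (p ++ [s])[i]? = none := List.getElem?_eq_none (by simp; omega)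
          simp [hmod, Ne.symm hc, h2, h3]

-- the transposed chunks give exactly the round-robin residue classes
theorem pv_chunks (m : Nat) (hm : 0 < m) (i : Nat) (hi : i < m) :
    ∀ (xs : List (List (String × Int))),
      (pvChunksB xs (m : Int)).filterMap (fun c => PySem.List.pyGet? c (i : Int))
        = pvBfil xs 0 m i := by
  intro xs
  induction hn : xs.length using Nat.strong_induction_on generalizing xs with
  | _ n ih =>
    by_cases hx : xs = []
    · subst hx; simp [pvChunksB, pvBfil]
    · rw [pvChunksB]
      have hm1 : ¬ ((m : Int) < 1) := by exact_mod_cast Nat.not_lt.mpr hm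
      simp only [dif_neg hx, dif_neg hm1]
      rw [PySem.List.slice_to_natCast, PySem.List.slice_from_natCast]
      have hxlen : 0 < xs.length := List.length_pos_iff.mpr hx
      have hsplit : xs = xs.take m ++ xs.drop m := (List.take_append_drop m xs).symm
      have hL : pvBfil xs 0 m i
          = pvBfil (xs.take m) 0 m i ++ pvBfil (xs.drop m) (0 + (xs.take m).length) m i := by
        conv_lhs => rw [hsplit]
        exact pvBfil_app _ _ 0 m i
      rw [List.filterMap_cons]
      have hhead : PySem.List.pyGet? (xs.take m) (i : Int) = (xs.take m)[i]? := by
        simp [PySem.List.pyGet?_natCast]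
      by_cases hlen : xs.length ≤ m
      · -- a single chunk: drop m = []
        have hdrop : xs.drop m = [] := List.drop_eq_nil_of_le hlen
        have htake : xs.take m = xs := List.take_of_length_le hlen
        rw [hdrop, pvChunksB]
        simp only [dif_pos]
        rw [hL, hdrop]
        rw [pvBfil_small (xs.take m) m i (by simp)]
        simp only [pvBfil, List.append_nil, hhead]
        cases h : (xs.take m)[i]? <;> simp [h]
      · have hmlt : m < xs.length := by omega
        have htl : (xs.take m).length = m := by simp; omega
        have hrec : (pvChunksB (xs.drop m) (m : Int)).filterMap (fun c => PySem.List.pyGet? c (i : Int))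
            = pvBfil (xs.drop m) 0 m i := by
          apply ih (xs.drop m).length _ (xs.drop m) rfl
          simp only [List.length_drop]
          omega
        have hsh : pvBfil (xs.drop m) m m i = pvBfil (xs.drop m) 0 m i := by
          have := pvBfil_shift (xs.drop m) 0 m i
          rwa [Nat.zero_add] at this
        rw [hrec, hL, htl, Nat.zero_add, hsh]
        rw [pvBfil_small (xs.take m) m i (le_of_eq htl), hhead]
        cases h : (xs.take m)[i]? <;> simp [h]

-- ===== VERDICT (by name: the statement is the Claim_ definition above) =====
theorem bucketize_specs_py_spec : Claim_equal_bucketize_specs_py := by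
  intro specs workers _dom
  unfold Spec_bucketize_specs_py bucketize_specs_py bucketize_specs_py_alt
  by_cases hs : specs = []
  · simp [hs]
  · simp only [if_neg hs]
    set n : Int := max 1 (min workers (specs.length : Int)) with hn
    have hn1 : 1 ≤ n := le_max_left _ _
    have hm0 : 0 < n.toNat := by omega
    have hcast : ((n.toNat : Nat) : Int) = n := Int.toNat_of_nonneg (by omega)
    rw [← hcast, pv_init n.toNat, pv_foldA specs [] n.toNat hm0]
    simp only [List.nil_append]
    rw [PySem.List.pyRange_one]
    simp only [Int.sub_zero, Int.toNat_natCast]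
    apply List.ext_getElem
    · simp
    · intro j hj hj'
      have hjm : j < n.toNat := by simpa using hj
      simp only [List.getElem_map, List.getElem_range]
      rw [zero_add]
      exact (pv_chunks n.toNat hm0 j hjm specs).symm
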